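-- pv_equiv track=rewrite | github.com/raphaelitos/ParadigamasProgramacao | lista_funcional/v2_resposta.py | split_token
-- ===== SOURCE A (Python) =====
-- def split_token(token, lst):
--     """Divide lista em sublistas separadas por token."""
--     result, temp = [], []
--     for x in lst:
--         if x == token:
--             result.append(temp)
--             temp = []
--         else:
--             temp.append(x)
--     if temp: result.append(temp)
--     return result
-- ===== SOURCE B (Python) =====
-- def split_token(token, lst):
--     """Divide lista em sublistas separadas por token."""
--     result = []
--     rest = lst
--     while token in rest:
--         i = rest.index(token)
--         result.append(rest[:i])
--         rest = rest[i + 1:]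
--     if rest:
--         result.append(rest)
--     return result
-- ===== Notes on version B (the rewrite author's own statement) =====
-- stated objective: alternative
-- what changed: Replaces the element-by-element loop with a temp accumulator by a repeated find-first-separator (list.index) plus slicing loop that peels one chunk per iteration; the trailing accidental-empty-drop falls out of the final non-empty-remainder guard.
import Mathlib
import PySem

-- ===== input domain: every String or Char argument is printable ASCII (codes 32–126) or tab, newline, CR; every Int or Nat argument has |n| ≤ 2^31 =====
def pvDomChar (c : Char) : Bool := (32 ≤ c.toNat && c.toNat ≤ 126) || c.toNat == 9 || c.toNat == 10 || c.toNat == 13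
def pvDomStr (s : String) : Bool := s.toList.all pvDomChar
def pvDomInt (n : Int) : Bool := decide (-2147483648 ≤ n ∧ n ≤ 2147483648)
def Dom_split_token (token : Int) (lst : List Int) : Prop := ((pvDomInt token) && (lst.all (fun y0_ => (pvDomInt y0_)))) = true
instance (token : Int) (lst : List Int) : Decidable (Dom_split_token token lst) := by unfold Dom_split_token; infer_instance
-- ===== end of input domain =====

-- B replaces A's element-by-element accumulator loop by a repeated first-separator-index + slice loop (alternative decomposition, not faster).


-- ===== PORT A =====
-- loop body of A's for-loop, as a helper
def stepA (token : Int) (st : List (List Int) × List Int) (x : Int) :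
    List (List Int) × List Int :=
  if x = token then (st.1 ++ [st.2], ([] : List Int)) else (st.1, st.2 ++ [x])

def split_token (token : Int) (lst : List Int) : List (List Int) :=
  let st := lst.foldl (stepA token) ([], [])
  if st.2 ≠ [] then st.1 ++ [st.2] else st.1

-- ===== PORT B =====
-- B's while-loop: while token in rest: i = rest.index(token); result.append(rest[:i]); rest = rest[i+1:]
-- `.index` is guarded by `token in rest`, so `(index? …).getD 0` is exact here (the none case never occurs)
def altLoop (token : Int) (result : List (List Int)) (rest : List Int) : List (List Int) :=
  if h : token ∈ rest then
    let i : Nat := (PySem.List.index? rest token).getD 0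
    altLoop token (result ++ [PySem.List.slice rest none (some (i : Int))])
      (PySem.List.slice rest (some ((i : Int) + 1)) none)
  else if rest ≠ [] then result ++ [rest] else result
termination_by rest.length
decreasing_by
  have hne : rest ≠ [] := by rintro rfl; simp at h
  have hcast : ((i : Int) + 1) = (((i + 1 : Nat)) : Int) := by push_cast; ring
  rw [hcast, PySem.List.slice_from_natCast]
  have : 0 < rest.length := List.length_pos_iff.mpr hne
  simp only [List.length_drop]
  omega

def split_token_alt (token : Int) (lst : List Int) : List (List Int) :=
  altLoop token [] lst

-- ===== PRECONDITION & SPEC =====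
def Spec_split_token (token : Int) (lst : List Int) (out : List (List Int)) : Prop := out = split_token_alt token lst
instance (token : Int) (lst : List Int) (out : List (List Int)) : Decidable (Spec_split_token token lst out) := by unfold Spec_split_token; infer_instance

-- ===== CLAIM (what is proved, stated in full; the proofs are below) =====
def Claim_equal_split_token : Prop := ∀ (token : Int) (lst : List Int), Dom_split_token token lst → Spec_split_token token lst (split_token token lst)

-- ===== LEMMAS AND PROOFS =====

-- A's loop over a token-free list just extends temp
lemma foldA_no_token (token : Int) (l : List Int) (h : token ∉ l) :
    ∀ res tmp, l.foldl (stepA token) (res, tmp) = (res, tmp ++ l) := by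
  induction l with
  | nil => intro res tmp; simp
  | cons a l ih =>
      intro res tmp
      have ha : a ≠ token := by rintro rfl; exact h (List.mem_cons_self)
      have hl : token ∉ l := fun hm => h (List.mem_cons_of_mem _ hm)
      simp only [List.foldl_cons, stepA, if_neg ha, ih hl]
      simp

-- the result accumulator of A's loop is a pure prefix
lemma foldA_acc (token : Int) :
    ∀ (l : List Int) (res : List (List Int)) (tmp : List Int),
      l.foldl (stepA token) (res, tmp) =
        (res ++ (l.foldl (stepA token) ([], tmp)).1, (l.foldl (stepA token) ([], tmp)).2) := by
  intro l
  induction l with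
  | nil => intro res tmp; simp
  | cons x l ih =>
      intro res tmp
      by_cases hx : x = token
      · simp only [List.foldl_cons, stepA, if_pos hx]
        rw [ih (res ++ [tmp]) [], ih ([] ++ [tmp]) []]
        simp
      · simp only [List.foldl_cons, stepA, if_neg hx]
        rw [ih res (tmp ++ [x]), ih [] (tmp ++ [x])]

-- A on (pre ++ token :: suf), token ∉ pre, emits pre and continues on suf
lemma A_decomp (token : Int) (pre suf : List Int) (h : token ∉ pre) :
    split_token token (pre ++ token :: suf) = [pre] ++ split_token token suf := by
  unfold split_token
  rw [List.foldl_append, foldA_no_token token pre h, List.foldl_cons]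
  simp only [stepA, if_true, List.nil_append]
  rw [foldA_acc token suf [pre] []]
  split_ifs <;> simp

-- A on a token-free list
lemma A_no_token (token : Int) (lst : List Int) (h : token ∉ lst) :
    split_token token lst = if lst ≠ [] then [lst] else [] := by
  unfold split_token
  rw [foldA_no_token token lst h [] []]
  simp

-- B's loop when the separator is absent
lemma altLoop_not_mem (token : Int) (res : List (List Int)) (rest : List Int)
    (h : token ∉ rest) :
    altLoop token res rest = if rest ≠ [] then res ++ [rest] else res := by
  rw [altLoop]
  simp [h]

-- B's loop peels the first chunk
lemma altLoop_decomp (token : Int) (res : List (List Int)) (pre suf : List Int)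
    (h : token ∉ pre) :
    altLoop token res (pre ++ token :: suf) = altLoop token (res ++ [pre]) suf := by
  rw [altLoop]
  have hm : token ∈ pre ++ token :: suf := by simp
  have hidx : PySem.List.index? (pre ++ token :: suf) token = some pre.length :=
    (PySem.List.index?_eq_some_iff _ _ _).mpr ⟨pre, suf, rfl, rfl, h⟩
  have h1 : PySem.List.slice (pre ++ token :: suf) none (some ((pre.length : Nat) : Int))
      = pre := by
    rw [PySem.List.slice_to_natCast]
    exact List.take_left
  have h2 : PySem.List.slice (pre ++ token :: suf) (some (((pre.length : Nat) : Int) + 1)) none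
      = suf := by
    have hcast : (((pre.length : Nat) : Int) + 1) = (((pre.length + 1 : Nat)) : Int) := by
      push_cast; ring
    rw [hcast, PySem.List.slice_from_natCast]
    have : pre ++ token :: suf = (pre ++ [token]) ++ suf := by simp
    rw [this]
    have hlen : pre.length + 1 = (pre ++ [token]).length := by simp
    rw [hlen]
    exact List.drop_left
  simp only [dif_pos hm, hidx, Option.getD_some, h1, h2]

-- B's loop equals res ++ A, by strong induction on the list length
lemma altLoop_eq (token : Int) :
    ∀ (n : Nat) (lst : List Int), lst.length ≤ n →
      ∀ res, altLoop token res lst = res ++ split_token token lst := by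
  intro n
  induction n with
  | zero =>
      intro lst hlen res
      have : lst = [] := List.eq_nil_of_length_eq_zero (Nat.le_zero.mp hlen)
      subst this
      rw [altLoop_not_mem token res [] (by simp), A_no_token token [] (by simp)]
      simp
  | succ n ih =>
      intro lst hlen res
      by_cases hm : token ∈ lst
      · obtain ⟨k, hk⟩ := Option.isSome_iff_exists.mp
          ((PySem.List.index?_isSome_iff lst token).mpr hm)
        obtain ⟨pre, suf, hdec, -, hpre⟩ := (PySem.List.index?_eq_some_iff _ _ _).mp hk
        subst hdec
        rw [altLoop_decomp token res pre suf hpre, A_decomp token pre suf hpre]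
        have hsuf : suf.length ≤ n := by
          have := hlen; simp [List.length_append] at this; omega
        rw [ih suf hsuf (res ++ [pre])]
        simp
      · rw [altLoop_not_mem token res lst hm, A_no_token token lst hm]
        split_ifs <;> simp

-- ===== VERDICT (by name: the statement is the Claim_ definition above) =====
theorem split_token_spec : Claim_equal_split_token := by
  intro token lst _
  unfold Spec_split_token split_token_alt
  have h := altLoop_eq token lst.length lst le_rfl []
  simp only [List.nil_append] at h
  exact h.symm
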